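-- pv_equiv track=rewrite | github.com/CwbhX/OpenClawHomeAssistantIntegration | custom_components/openclaw/native_tools.py | _coerce_identifier
-- ===== SOURCE A (Python) =====
-- from typing import Any, Callable
--
-- class NativeToolError(Exception):
--     """Raised when a native tool request cannot be satisfied."""
--
-- def _coerce_identifier(value: Any) -> str:
--     """Convert a free-form label into a file- and entity-friendly identifier."""
--     text = str(value or "").strip().lower()
--     if not text:
--         raise NativeToolError("Resource identifiers cannot be blank")
--     output: list[str] = []
--     last_was_sep = False
--     for char in text:
--         if char.isalnum():
--             output.append(char)
--             last_was_sep = False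
--             continue
--         if char in {"_", "-", " "} and not last_was_sep:
--             output.append("_")
--             last_was_sep = True
--     identifier = "".join(output).strip("_")
--     if not identifier:
--         raise NativeToolError(f"Could not derive a valid identifier from '{value}'")
--     return identifier
-- ===== SOURCE B (Python) =====
-- class NativeToolError(Exception):
--     """Raised when a native tool request cannot be satisfied."""
--
-- def _coerce_identifier(value):
--     """Convert a free-form label into a file- and entity-friendly identifier."""
--     text = str(value or "").strip().lower()
--     if not text:
--         raise NativeToolError("Resource identifiers cannot be blank")
--     words = []
--     current = ""
--     for c in text:
--         if c.isalnum():
--             current += c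
--         elif c in "_- ":
--             if current:
--                 words.append(current)
--             current = ""
--     if current:
--         words.append(current)
--     identifier = "_".join(words)
--     if not identifier:
--         raise NativeToolError(f"Could not derive a valid identifier from '{value}'")
--     return identifier
-- ===== Notes on version B (the rewrite author's own statement) =====
-- stated objective: simpler
-- what changed: A emits characters into one flat buffer with a last_was_sep flag and finally strips edge underscores; B instead accumulates a list of words (flushing the current word at each separator) and joins them with '_', so no flag and no strip pass exist.
import Mathlib
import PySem

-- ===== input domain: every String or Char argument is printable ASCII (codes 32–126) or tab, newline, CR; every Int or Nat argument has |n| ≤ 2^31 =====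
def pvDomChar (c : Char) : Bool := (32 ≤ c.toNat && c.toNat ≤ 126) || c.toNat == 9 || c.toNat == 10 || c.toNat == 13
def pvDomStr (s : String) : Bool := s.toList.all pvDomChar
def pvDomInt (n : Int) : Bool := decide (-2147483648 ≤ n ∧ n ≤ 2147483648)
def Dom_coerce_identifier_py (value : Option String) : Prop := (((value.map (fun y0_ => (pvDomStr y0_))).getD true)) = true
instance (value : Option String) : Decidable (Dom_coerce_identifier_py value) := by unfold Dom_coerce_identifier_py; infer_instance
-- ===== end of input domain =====

-- B accumulates a list of words (flushing the current word at each separator) and joins them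
-- with '_', replacing A's flat buffer + last_was_sep flag + final strip('_') (objective: simpler).
-- Equality proved on Pre_ (A raises elsewhere).

-- ===== PORT A =====
-- Literal port of _coerce_identifier; where the Python raises NativeToolError the port
-- returns "" (those inputs are excluded by Pre_coerce_identifier_py).
def coerce_identifier_py (value : Option String) : String :=
  let text := PySem.Str.lower (PySem.Str.strip (value.getD ""))
  if text = "" then ""   -- raise NativeToolError("Resource identifiers cannot be blank")
  else
    let st := text.toList.foldl (fun (st : List Char × Bool) char =>
      if PySem.Chars.isalnum char then (st.1 ++ [char], false)
      else if (char = '_' ∨ char = '-' ∨ char = ' ') ∧ st.2 = false then (st.1 ++ ['_'], true)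
      else st) ([], false)
    let identifier := PySem.Chars.stripChars st.1 ['_']
    if identifier = [] then ""   -- raise NativeToolError(f"Could not derive …")
    else String.ofList identifier

-- ===== PORT B =====
-- Literal port of Source B; the word list is (words, current); `c in "_- "` is char membership.
def coerce_identifier_py_alt (value : Option String) : String :=
  let text := PySem.Str.lower (PySem.Str.strip (value.getD ""))
  if text = "" then ""   -- raise NativeToolError("Resource identifiers cannot be blank")
  else
    let acc := text.toList.foldl (fun (acc : List (List Char) × List Char) c =>
      if PySem.Chars.isalnum c then (acc.1, acc.2 ++ [c])
      else if ("_- ".toList).contains c then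
        ((if acc.2 ≠ [] then acc.1 ++ [acc.2] else acc.1), [])
      else acc) ([], [])
    let words := if acc.2 ≠ [] then acc.1 ++ [acc.2] else acc.1
    let identifier := PySem.Chars.join ['_'] words
    if identifier = [] then ""   -- raise NativeToolError(f"Could not derive …")
    else String.ofList identifier

-- ===== PRECONDITION & SPEC =====
-- Pre_ excludes exactly the inputs on which A raises NativeToolError: those whose string
-- carries no alphanumeric character (then the derived identifier would be blank).
def Pre_coerce_identifier_py (value : Option String) : Prop :=
  (value.getD "").toList.any PySem.Chars.isalnum = true
instance (value : Option String) : Decidable (Pre_coerce_identifier_py value) := by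
  unfold Pre_coerce_identifier_py; infer_instance
def pvWitness_coerce_identifier_py : Option String := some "Hello World!"

def Spec_coerce_identifier_py (value : Option String) (out : String) : Prop := out = coerce_identifier_py_alt value
instance (value : Option String) (out : String) : Decidable (Spec_coerce_identifier_py value out) := by unfold Spec_coerce_identifier_py; infer_instance

-- ===== CLAIM (what is proved, stated in full; the proofs are below) =====
def Claim_equal_coerce_identifier_py : Prop := ∀ (value : Option String), Dom_coerce_identifier_py value → Pre_coerce_identifier_py value → Spec_coerce_identifier_py value (coerce_identifier_py value)

-- ===== LEMMAS AND PROOFS =====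

-- the per-character cleaning A effectively applies: alnum → itself, separator → space, else nothing
def pvF (c : Char) : List Char :=
  if PySem.Chars.isalnum c then [c] else if c = '_' ∨ c = '-' ∨ c = ' ' then [' '] else []

-- run-collapsing over an alnum/space list: what A's loop emits
def pvCollapse : Bool → List Char → List Char
  | _, [] => []
  | b, c :: cs =>
    if c = ' ' then (if b then pvCollapse true cs else '_' :: pvCollapse true cs)
    else c :: pvCollapse false cs

def pvNS (c : Char) : Bool := !(c == ' ')
def pvSP (c : Char) : Bool := (c == ' ')
def pvUS (c : Char) : Bool := (['_'] : List Char).contains c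

-- whitespace-split of an alnum/space list, structurally
def pvWordsOf : List Char → List (List Char)
  | [] => []
  | c :: cs =>
    if c == ' ' then pvWordsOf cs
    else (c :: cs.takeWhile pvNS) :: pvWordsOf (cs.dropWhile pvNS)
termination_by l => l.length
decreasing_by
  · simp
  · exact Nat.lt_succ_of_le (List.length_dropWhile_le _ _)

-- B's word accumulation, read over the cleaned alnum/space list
def pvAppWords : List Char → List Char → List (List Char)
  | cur, [] => if cur = [] then [] else [cur]
  | cur, c :: u =>
    if c = ' ' then (if cur = [] then [] else [cur]) ++ pvAppWords [] u
    else pvAppWords (cur ++ [c]) u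

def pvTail : List (List Char) → List Char
  | [] => []
  | w :: ws => '_' :: List.intercalate ['_'] (w :: ws)

def pvRstrip (y : List Char) : List Char := (y.reverse.dropWhile pvUS).reverse

lemma pvWordsOf_nil : pvWordsOf [] = [] := by rw [pvWordsOf]

lemma pvWordsOf_cons (c : Char) (cs : List Char) :
    pvWordsOf (c :: cs) = if c == ' ' then pvWordsOf cs
      else (c :: cs.takeWhile pvNS) :: pvWordsOf (cs.dropWhile pvNS) := by
  rw [pvWordsOf]

lemma pvWordsOf_space (cs : List Char) : pvWordsOf (' ' :: cs) = pvWordsOf cs := by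
  rw [pvWordsOf_cons]; simp

lemma pvWordsOf_word {c : Char} (cs : List Char) (h : c ≠ ' ') :
    pvWordsOf (c :: cs) = (c :: cs.takeWhile pvNS) :: pvWordsOf (cs.dropWhile pvNS) := by
  rw [pvWordsOf_cons]; simp [h]

def pvOK (u : List Char) : Prop := ∀ c ∈ u, c = ' ' ∨ PySem.Chars.isalnum c = true

lemma pv_alnum_ne_space (c : Char) (h : PySem.Chars.isalnum c = true) : c ≠ ' ' := by
  rintro rfl; exact absurd h (by decide)

lemma pv_alnum_us (c : Char) (h : PySem.Chars.isalnum c = true) : pvUS c = false := by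
  simp only [pvUS, List.contains_cons, List.contains_nil, Bool.or_false, beq_eq_false_iff_ne]
  rintro rfl; exact absurd h (by decide)

lemma pv_ok_cons {c : Char} {cs : List Char} (h : pvOK (c :: cs)) : pvOK cs :=
  fun x hx => h x (List.mem_cons_of_mem _ hx)

lemma pv_ok_sublist {u v : List Char} (hs : v.Sublist u) (h : pvOK u) : pvOK v :=
  fun x hx => h x (hs.mem hx)

lemma pv_fold_spec (t : List Char) (out : List Char) (b : Bool) :
    (t.foldl (fun (st : List Char × Bool) char =>
      if PySem.Chars.isalnum char then (st.1 ++ [char], false)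
      else if (char = '_' ∨ char = '-' ∨ char = ' ') ∧ st.2 = false then (st.1 ++ ['_'], true)
      else st) (out, b)).1 = out ++ pvCollapse b (t.flatMap pvF) := by
  induction t generalizing out b with
  | nil => simp [pvCollapse]
  | cons c cs ih =>
    simp only [List.foldl_cons, List.flatMap_cons]
    by_cases ha : PySem.Chars.isalnum c = true
    · rw [if_pos ha]
      have hcs : pvF c = [c] := by simp [pvF, ha]
      rw [hcs]
      simp only [List.singleton_append, pvCollapse, if_neg (pv_alnum_ne_space c ha)]
      rw [ih]; simp
    · rw [if_neg ha]
      by_cases hsep : c = '_' ∨ c = '-' ∨ c = ' '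
      · have hcs : pvF c = [' '] := by simp [pvF, ha, hsep]
        rw [hcs]
        cases b with
        | true =>
          rw [if_neg (by simp)]
          simp [pvCollapse, ih]
        | false =>
          rw [if_pos ⟨hsep, rfl⟩]
          simp [pvCollapse, ih]
      · have hcs : pvF c = [] := by simp [pvF, ha, hsep]
        rw [hcs, if_neg (by simp [hsep])]
        simp only [List.nil_append, ih]

-- B's fold, driven by the raw text, accumulates exactly pvAppWords over the cleaned list
lemma pv_foldB_spec (t : List Char) (ws : List (List Char)) (cur : List Char) :
    (let acc := t.foldl (fun (acc : List (List Char) × List Char) c =>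
      if PySem.Chars.isalnum c then (acc.1, acc.2 ++ [c])
      else if ("_- ".toList).contains c then
        ((if acc.2 ≠ [] then acc.1 ++ [acc.2] else acc.1), [])
      else acc) (ws, cur)
    if acc.2 ≠ [] then acc.1 ++ [acc.2] else acc.1) = ws ++ pvAppWords cur (t.flatMap pvF) := by
  induction t generalizing ws cur with
  | nil =>
    simp only [List.foldl_nil, List.flatMap_nil, pvAppWords]
    split_ifs with h1 h2 <;> simp_all
  | cons c cs ih =>
    simp only [List.foldl_cons, List.flatMap_cons]
    by_cases ha : PySem.Chars.isalnum c = true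
    · rw [if_pos ha]
      have hcs : pvF c = [c] := by simp [pvF, ha]
      rw [hcs, List.singleton_append, pvAppWords, if_neg (pv_alnum_ne_space c ha)]
      exact ih ws (cur ++ [c])
    · rw [if_neg ha]
      by_cases hsep : c = '_' ∨ c = '-' ∨ c = ' '
      · have hm : ("_- ".toList).contains c = true := by
          rcases hsep with h | h | h <;> subst h <;> decide
        have hcs : pvF c = [' '] := by simp [pvF, ha, hsep]
        rw [if_pos hm, hcs, List.singleton_append, pvAppWords, if_pos rfl]
        rw [ih _ []]
        by_cases hc : cur = []
        · simp [hc]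
        · simp [hc]
      · have hm : ("_- ".toList).contains c = false := by
          simp only [List.contains_eq_mem, decide_eq_false_iff_not]
          intro hmem
          apply hsep
          have : ("_- ".toList) = ['_', '-', ' '] := rfl
          rw [this] at hmem
          simpa using hmem
        have hcs : pvF c = [] := by simp [pvF, ha, hsep]
        rw [hcs, List.nil_append]
        have hid : (if ("_- ".toList).contains c = true then
            ((if cur ≠ [] then ws ++ [cur] else ws), ([] : List Char)) else (ws, cur)) =
            (ws, cur) := by rw [hm]; simp
        rw [hid]
        exact ih ws cur

-- over a cleaned (alnum/space) list, B's word accumulation is the whitespace split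
lemma pv_appWords_spec (u : List Char) (hOK : pvOK u) :
    pvAppWords [] u = pvWordsOf u ∧
    (∀ cur, cur ≠ [] → pvAppWords cur u =
      (cur ++ u.takeWhile pvNS) :: pvWordsOf (u.dropWhile pvNS)) := by
  induction u with
  | nil =>
    constructor
    · simp [pvAppWords, pvWordsOf_nil]
    · intro cur hcur; simp [pvAppWords, hcur, pvWordsOf_nil]
  | cons c u ih =>
    obtain ⟨ih1, ih2⟩ := ih (pv_ok_cons hOK)
    rcases hOK c (List.mem_cons_self) with hc | hc
    · subst hc
      have hns : pvNS ' ' = false := by decide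
      constructor
      · rw [pvAppWords, if_pos rfl, if_pos rfl, List.nil_append, ih1, pvWordsOf_space]
      · intro cur hcur
        rw [pvAppWords, if_pos rfl, if_neg hcur, ih1]
        rw [List.takeWhile_cons_of_neg (by simp [hns]),
          List.dropWhile_cons_of_neg (by simp [hns]), pvWordsOf_space]
        simp
    · have hne : c ≠ ' ' := pv_alnum_ne_space c hc
      have hpv : pvNS c = true := by simp [pvNS, hne]
      constructor
      · rw [pvAppWords, if_neg hne, List.nil_append, ih2 [c] (by simp)]
        rw [pvWordsOf_word u hne]
        simp
      · intro cur hcur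
        rw [pvAppWords, if_neg hne, ih2 (cur ++ [c]) (by simp)]
        rw [List.takeWhile_cons_of_pos hpv, List.dropWhile_cons_of_pos hpv]
        simp

lemma pv_ok_flatMap (t : List Char) : pvOK (t.flatMap pvF) := by
  intro c hc
  simp only [List.mem_flatMap] at hc
  obtain ⟨a, -, hm⟩ := hc
  unfold pvF at hm
  split_ifs at hm with h1 h2
  · simp only [List.mem_singleton] at hm; subst hm; right; exact h1
  · simp only [List.mem_singleton] at hm; subst hm; left; rfl
  · simp at hm

lemma pv_collapse_true (cs : List Char) :
    pvCollapse true cs = pvCollapse false (cs.dropWhile pvSP) := by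
  induction cs with
  | nil => rfl
  | cons c cs ih =>
    by_cases hc : c = ' '
    · subst hc
      rw [List.dropWhile_cons_of_pos (by simp [pvSP])]
      simpa [pvCollapse] using ih
    · rw [List.dropWhile_cons_of_neg (by simp [pvSP, hc])]
      simp [pvCollapse, hc]

lemma pv_words_drop (cs : List Char) : pvWordsOf (cs.dropWhile pvSP) = pvWordsOf cs := by
  induction cs with
  | nil => rfl
  | cons c cs ih =>
    by_cases hc : c = ' '
    · subst hc
      rw [List.dropWhile_cons_of_pos (by simp [pvSP])]
      rw [ih, pvWordsOf_space]
    · rw [List.dropWhile_cons_of_neg (by simp [pvSP, hc])]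

lemma pv_rstrip_cons_nonus (a : Char) (y : List Char) (h : pvUS a = false) :
    pvRstrip (a :: y) = a :: pvRstrip y := by
  have hd : List.dropWhile pvUS (y.reverse ++ [a]) = List.dropWhile pvUS y.reverse ++ [a] := by
    rw [List.dropWhile_append]
    split_ifs with he
    · rw [List.isEmpty_iff.mp he, List.dropWhile_cons_of_neg (by simp [h])]
      simp
    · rfl
  simp [pvRstrip, hd]

lemma pv_rstrip_cons_ne (a : Char) (y : List Char) (h : pvRstrip y ≠ []) :
    pvRstrip (a :: y) = a :: pvRstrip y := by
  have hne : (y.reverse.dropWhile pvUS).isEmpty = false := by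
    rcases he : y.reverse.dropWhile pvUS with _ | ⟨x, xs⟩
    · exact absurd (by simp [pvRstrip, he]) h
    · simp
  simp only [pvRstrip, List.reverse_cons, List.dropWhile_append, hne, if_neg Bool.false_ne_true]
  simp

lemma pv_intercalate_cons (w : List Char) (ws : List (List Char)) :
    List.intercalate ['_'] (w :: ws) = w ++ pvTail ws := by
  cases ws with
  | nil => simp [List.intercalate, pvTail]
  | cons v ws' =>
    have : List.intercalate ['_'] (w :: v :: ws') = w ++ ['_'] ++ List.intercalate ['_'] (v :: ws') := by
      simp [List.intercalate, List.intersperse]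
    rw [this, pvTail]
    simp

lemma pv_dropWhile_head_false {p : Char → Bool} {l : List Char} {c : Char} {cs : List Char}
    (h : l.dropWhile p = c :: cs) : p c = false := by
  induction l with
  | nil => simp at h
  | cons x xs ih =>
    by_cases hx : p x
    · rw [List.dropWhile_cons_of_pos hx] at h; exact ih h
    · rw [List.dropWhile_cons_of_neg (by simpa using hx)] at h
      cases h; simpa using hx

lemma pv_W : ∀ (n : Nat) (u : List Char), u.length ≤ n → pvOK u →
    pvRstrip (pvCollapse false u) =
      u.takeWhile pvNS ++ pvTail (pvWordsOf (u.dropWhile pvNS)) := by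
  intro n
  induction n with
  | zero =>
    intro u hlen _
    have : u = [] := List.eq_nil_of_length_eq_zero (Nat.le_zero.mp hlen)
    subst this
    simp [pvCollapse, pvRstrip, pvWordsOf_nil, pvTail]
  | succ n ih =>
    intro u hlen hOK
    cases u with
    | nil => simp [pvCollapse, pvRstrip, pvWordsOf_nil, pvTail]
    | cons c cs =>
      rcases hOK c (List.mem_cons_self) with hc | hc
      · -- c = ' '
        subst hc
        have hns : pvNS ' ' = false := by decide
        rw [List.takeWhile_cons_of_neg (by simp [hns]), List.dropWhile_cons_of_neg (by simp [hns])]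
        have hcoll : pvCollapse false (' ' :: cs) = '_' :: pvCollapse false (cs.dropWhile pvSP) := by
          simp [pvCollapse, pv_collapse_true]
        rw [hcoll]
        have hwords : pvWordsOf (' ' :: cs) = pvWordsOf (cs.dropWhile pvSP) := by
          rw [pv_words_drop, pvWordsOf_space]
        rw [hwords]
        have hOK' : pvOK (cs.dropWhile pvSP) :=
          pv_ok_sublist ((List.dropWhile_sublist _).trans (List.sublist_cons_self _ _)) hOK
        rcases hd : cs.dropWhile pvSP with _ | ⟨c2, cs2⟩
        · simp [pvCollapse, pvWordsOf_nil, pvTail, pvRstrip, pvUS]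
        · have hc2sp : pvSP c2 = false := pv_dropWhile_head_false hd
          have hc2 : PySem.Chars.isalnum c2 = true := by
            rcases hOK' c2 (hd ▸ List.mem_cons_self) with h | h
            · subst h; exact absurd hc2sp (by decide)
            · exact h
          have hcoll2 : pvCollapse false (c2 :: cs2) = c2 :: pvCollapse false cs2 := by
            simp [pvCollapse, pv_alnum_ne_space c2 hc2]
          rw [hcoll2]
          have hr1 : pvRstrip (c2 :: pvCollapse false cs2) =
              c2 :: pvRstrip (pvCollapse false cs2) :=
            pv_rstrip_cons_nonus c2 _ (pv_alnum_us c2 hc2)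
          have hr2 : pvRstrip ('_' :: c2 :: pvCollapse false cs2) =
              '_' :: pvRstrip (c2 :: pvCollapse false cs2) := by
            apply pv_rstrip_cons_ne
            rw [hr1]; simp
          rw [hr2, hr1]
          have hlen2 : cs2.length ≤ n := by
            have h1 : (cs.dropWhile pvSP).length ≤ cs.length := List.length_dropWhile_le _ _
            have h2 : cs.length ≤ n := by simpa using Nat.le_of_succ_le_succ hlen
            rw [hd] at h1
            simp at h1
            omega
          have hOK2 : pvOK cs2 := pv_ok_cons (hd ▸ hOK')
          rw [ih cs2 hlen2 hOK2]
          have hw2 : pvWordsOf (c2 :: cs2) =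
              (c2 :: cs2.takeWhile pvNS) :: pvWordsOf (cs2.dropWhile pvNS) :=
            pvWordsOf_word cs2 (pv_alnum_ne_space c2 hc2)
          rw [hw2, pvTail, pv_intercalate_cons]
          simp
      · -- alnum c
        have hne : c ≠ ' ' := pv_alnum_ne_space c hc
        have hpv : pvNS c = true := by simp [pvNS, hne]
        rw [List.takeWhile_cons_of_pos hpv, List.dropWhile_cons_of_pos hpv]
        have hcoll : pvCollapse false (c :: cs) = c :: pvCollapse false cs := by
          simp [pvCollapse, hne]
        rw [hcoll, pv_rstrip_cons_nonus c _ (pv_alnum_us c hc)]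
        rw [ih cs (by simpa using Nat.le_of_succ_le_succ hlen) (pv_ok_cons hOK)]
        simp

lemma pv_strip_eq (y : List Char) :
    PySem.Chars.stripChars y ['_'] = pvRstrip (y.dropWhile pvUS) := rfl

lemma pv_main : ∀ (n : Nat) (u : List Char), u.length ≤ n → pvOK u →
    PySem.Chars.stripChars (pvCollapse false u) ['_'] =
      List.intercalate ['_'] (pvWordsOf u) := by
  intro n
  induction n with
  | zero =>
    intro u hlen _
    have : u = [] := List.eq_nil_of_length_eq_zero (Nat.le_zero.mp hlen)
    subst this
    simp [pvCollapse, pvWordsOf_nil, PySem.Chars.stripChars, List.intercalate]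
  | succ n ih =>
    intro u hlen hOK
    cases u with
    | nil => simp [pvCollapse, pvWordsOf_nil, PySem.Chars.stripChars, List.intercalate]
    | cons c cs =>
      rcases hOK c (List.mem_cons_self) with hc | hc
      · -- leading space: strip the emitted leading '_' and recurse on cs without its leading spaces
        subst hc
        have hcoll : pvCollapse false (' ' :: cs) = '_' :: pvCollapse false (cs.dropWhile pvSP) := by
          simp [pvCollapse, pv_collapse_true]
        rw [hcoll, pv_strip_eq]
        rw [List.dropWhile_cons_of_pos (by simp [pvUS])]
        rw [← pv_strip_eq]
        have hOK' : pvOK (cs.dropWhile pvSP) :=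
          pv_ok_sublist ((List.dropWhile_sublist _).trans (List.sublist_cons_self _ _)) hOK
        have hlen' : (cs.dropWhile pvSP).length ≤ n := by
          have := List.length_dropWhile_le pvSP cs
          have h2 : cs.length ≤ n := by simpa using Nat.le_of_succ_le_succ hlen
          omega
        rw [ih _ hlen' hOK', pv_words_drop, pvWordsOf_space]
      · -- leading alnum: left strip is a no-op, conclude from pv_W
        have hne : c ≠ ' ' := pv_alnum_ne_space c hc
        rw [pv_strip_eq]
        have hcoll : pvCollapse false (c :: cs) = c :: pvCollapse false cs := by
          simp [pvCollapse, hne]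
        rw [hcoll, List.dropWhile_cons_of_neg (by simp [pv_alnum_us c hc]), ← hcoll]
        rw [pv_W (c :: cs).length (c :: cs) le_rfl hOK]
        have hpv : pvNS c = true := by simp [pvNS, hne]
        rw [List.takeWhile_cons_of_pos hpv, List.dropWhile_cons_of_pos hpv]
        have hw : pvWordsOf (c :: cs) =
            (c :: cs.takeWhile pvNS) :: pvWordsOf (cs.dropWhile pvNS) :=
          pvWordsOf_word cs hne
        rw [hw, pv_intercalate_cons]

-- ===== VERDICT (by name: the statement is the Claim_ definition above) =====
theorem coerce_identifier_py_spec : Claim_equal_coerce_identifier_py := by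
  intro value _dom _pre
  unfold Spec_coerce_identifier_py coerce_identifier_py coerce_identifier_py_alt
  simp only []
  by_cases ht : PySem.Str.lower (PySem.Str.strip (value.getD "")) = ""
  · rw [if_pos ht, if_pos ht]
  · rw [if_neg ht, if_neg ht]
    set t := (PySem.Str.lower (PySem.Str.strip (value.getD ""))).toList with hteq
    have hA : (t.foldl (fun (st : List Char × Bool) char =>
        if PySem.Chars.isalnum char then (st.1 ++ [char], false)
        else if (char = '_' ∨ char = '-' ∨ char = ' ') ∧ st.2 = false then (st.1 ++ ['_'], true)
        else st) ([], false)).1 = pvCollapse false (t.flatMap pvF) := by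
      simpa using pv_fold_spec t [] false
    have hB := pv_foldB_spec t [] []
    simp only [List.nil_append] at hB
    rw [hA, hB]
    rw [(pv_appWords_spec (t.flatMap pvF) (pv_ok_flatMap t)).1]
    rw [pv_main (t.flatMap pvF).length _ le_rfl (pv_ok_flatMap t)]
    rfl
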